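-- pv_equiv track=rewrite | github.com/nasa-nccs-hpda/agb | model/Hyper.py | _filterTids
-- ===== SOURCE A (Python) =====
-- def _filterTids(tids: list, inFiles: list):
--
--     filtered = []
--
--     for tid in tids:
--
--         for f in inFiles:
--
--             if tid in str(f):
--
--                 filtered.append(f)
--                 break
--
--     return filtered
-- ===== SOURCE B (Python) =====
-- def _filterTids(tids: list, inFiles: list):
--     found = {}
--     for f in inFiles:
--         s = str(f)
--         for tid in tids:
--             if tid not in found and tid in s:
--                 found[tid] = f
--     return [found[tid] for tid in tids if tid in found]
-- ===== Notes on version B (the rewrite author's own statement) =====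
-- stated objective: alternative
-- what changed: Replaces the tid-major nested loops (which rescan inFiles from the start for every tid) with a single file-major pass that builds a first-match dict, followed by one output pass over tids.
import Mathlib
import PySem

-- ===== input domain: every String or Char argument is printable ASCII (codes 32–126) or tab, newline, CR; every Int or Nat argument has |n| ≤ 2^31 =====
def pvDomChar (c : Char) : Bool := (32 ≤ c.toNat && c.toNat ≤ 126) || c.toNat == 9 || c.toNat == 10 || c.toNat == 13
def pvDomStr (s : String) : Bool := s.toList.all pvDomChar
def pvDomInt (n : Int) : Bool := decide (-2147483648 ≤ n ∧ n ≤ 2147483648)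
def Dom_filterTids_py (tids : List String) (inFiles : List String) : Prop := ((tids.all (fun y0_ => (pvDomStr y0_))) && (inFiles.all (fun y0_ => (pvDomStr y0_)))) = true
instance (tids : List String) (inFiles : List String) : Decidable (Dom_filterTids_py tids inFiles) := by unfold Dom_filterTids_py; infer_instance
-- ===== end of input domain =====

-- B replaces A's tid-major nested loops by one file-major pass building a first-match dict
-- plus an output pass over tids (objective: alternative decomposition, same exact results).


-- ===== PORT A =====
-- inner 'for f in inFiles: if tid in str(f): append f; break' = first file containing tid
def pvFirstMatch (tid : String) : List String → Option String
  | [] => none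
  | f :: rest => if PySem.Str.isIn tid f then some f else pvFirstMatch tid rest

def filterTids_py (tids : List String) (inFiles : List String) : List String :=
  tids.foldl (fun filtered tid =>
    match pvFirstMatch tid inFiles with
    | some f => filtered ++ [f]
    | none => filtered) []

-- ===== PORT B =====
-- one pass over inFiles: for each tid not yet found and contained in the file, record it
def pvBuildFound (tids : List String) (inFiles : List String) : PySem.Dict String String :=
  inFiles.foldl (fun d f =>
    tids.foldl (fun d tid =>
      if d.contains tid = false ∧ PySem.Str.isIn tid f then d.insert tid f else d) d)
    PySem.Dict.empty

def filterTids_py_alt (tids : List String) (inFiles : List String) : List String :=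
  let found := pvBuildFound tids inFiles
  tids.filterMap (fun tid => found.get? tid)

-- ===== PRECONDITION & SPEC =====
def Spec_filterTids_py (tids : List String) (inFiles : List String) (out : List String) : Prop := out = filterTids_py_alt tids inFiles
instance (tids : List String) (inFiles : List String) (out : List String) : Decidable (Spec_filterTids_py tids inFiles out) := by unfold Spec_filterTids_py; infer_instance

-- ===== CLAIM (what is proved, stated in full; the proofs are below) =====
def Claim_equal_filterTids_py : Prop := ∀ (tids : List String) (inFiles : List String), Dom_filterTids_py tids inFiles → Spec_filterTids_py tids inFiles (filterTids_py tids inFiles)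

-- ===== LEMMAS AND PROOFS =====

-- inner loop of B: its only effect on key `tid` is recording f at tid's first match
theorem pvInner_get? (f : String) (tid : String) :
    ∀ (tids : List String) (d : PySem.Dict String String),
    (tids.foldl (fun d t =>
      if d.contains t = false ∧ PySem.Str.isIn t f then d.insert t f else d) d).get? tid =
    if tid ∈ tids ∧ d.get? tid = none ∧ PySem.Str.isIn tid f then some f else d.get? tid := by
  intro tids
  induction tids with
  | nil => intro d; simp
  | cons t ts ih =>
    intro d
    simp only [List.foldl_cons]
    rw [ih]
    by_cases htid : tid = t
    · subst htid
      by_cases hin : PySem.Chars.isIn tid.toList f.toList = true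
      · by_cases hc : d.contains tid = false
        · have hnone : d.get? tid = none := by
            rwa [PySem.Dict.get?_eq_none_iff_contains]
          simp [PySem.Str.isIn, hc, hin, hnone, PySem.Dict.get?_insert_self]
        · have hsome : d.get? tid ≠ none := by
            intro h
            rw [PySem.Dict.get?_eq_none_iff_contains] at h
            exact hc h
          simp [PySem.Str.isIn, hc, hin, hsome]
      · simp [PySem.Str.isIn, hin]
    · have hne : t ≠ tid := fun h => htid h.symm
      by_cases hc : d.contains t = false
      · by_cases hin : PySem.Chars.isIn t.toList f.toList = true
        · simp [PySem.Str.isIn, hc, hin, PySem.Dict.get?_insert_of_ne d f htid, htid]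
        · simp [PySem.Str.isIn, hc, hin, htid]
      · simp [PySem.Str.isIn, hc, htid]

-- outer loop of B: found.get? tid is the first file (in file order) containing tid
theorem pvBuild_get? (tids : List String) (tid : String) (htid : tid ∈ tids) :
    ∀ (inFiles : List String) (d : PySem.Dict String String),
    (inFiles.foldl (fun d f =>
      tids.foldl (fun d t =>
        if d.contains t = false ∧ PySem.Str.isIn t f then d.insert t f else d) d) d).get? tid =
    match d.get? tid with
    | some v => some v
    | none => pvFirstMatch tid inFiles := by
  intro inFiles
  induction inFiles with
  | nil => intro d; cases h : d.get? tid <;> simp [h, pvFirstMatch]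
  | cons f fs ih =>
    intro d
    simp only [List.foldl_cons]
    rw [ih]
    rw [pvInner_get? f tid tids d]
    cases h : d.get? tid with
    | some v => simp
    | none =>
      by_cases hin : PySem.Chars.isIn tid.toList f.toList = true
      · simp [PySem.Str.isIn, htid, hin, pvFirstMatch]
      · simp [PySem.Str.isIn, htid, hin, pvFirstMatch]

theorem pvFound_get? (tids inFiles : List String) (tid : String) (htid : tid ∈ tids) :
    (pvBuildFound tids inFiles).get? tid = pvFirstMatch tid inFiles := by
  unfold pvBuildFound
  rw [pvBuild_get? tids tid htid inFiles PySem.Dict.empty]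
  simp

-- A's fold with append accumulator is a filterMap of pvFirstMatch
theorem pvA_eq_filterMap (inFiles : List String) :
    ∀ (tids : List String) (acc : List String),
    tids.foldl (fun filtered tid =>
      match pvFirstMatch tid inFiles with
      | some f => filtered ++ [f]
      | none => filtered) acc =
    acc ++ tids.filterMap (fun tid => pvFirstMatch tid inFiles) := by
  intro tids
  induction tids with
  | nil => intro acc; simp
  | cons t ts ih =>
    intro acc
    simp only [List.foldl_cons, List.filterMap_cons]
    cases h : pvFirstMatch t inFiles <;> simp [ih]

-- ===== VERDICT (by name: the statement is the Claim_ definition above) =====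
theorem filterTids_py_spec : Claim_equal_filterTids_py := by
  intro tids inFiles _
  unfold Spec_filterTids_py filterTids_py filterTids_py_alt
  rw [pvA_eq_filterMap inFiles tids []]
  simp only [List.nil_append]
  exact (List.filterMap_congr (fun tid htid => (pvFound_get? tids inFiles tid htid).symm))
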